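-- pv_equiv track=rewrite | github.com/Lujza44/bakalarka | code/visualization.py | to_bracket_notation
-- ===== SOURCE A (Python) =====
-- def to_bracket_notation(sequence, str_length):
--     result = []
--     current_str = sequence[:str_length]
--     count = 1
--
--     for i in range(str_length, len(sequence), str_length): # prechadzam sekvenciou po jednotlivych nt
--         next_str = sequence[i:i+str_length]
--
--         if next_str == current_str: # ak najblizsia repeticia je rovnaka ako aktualna
--             count += 1  # zvysim pocet
--         else: # ak je najblizia repeticia nova, tie predtym zapisem
--             if count > 1:  # v zatvorkovej notacii ak je repeticii viac
--                 result.append(f"[{current_str}]{count}")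
--             else:  # bez zatvoriek ak je iba jedna
--                 result.append(current_str)
--
--             current_str = next_str
--             count = 1
--
--     if count > 1: # pre poslednu poziciu
--         result.append(f"[{current_str}]{count}")
--     else:
--         result.append(current_str)
--
--     return ' '.join(result)
-- ===== SOURCE B (Python) =====
-- def to_bracket_notation(sequence, str_length):
--     chunks = [sequence[i:i+str_length] for i in range(0, len(sequence), str_length)]
--     parts = []
--     rest = chunks
--     while rest:
--         run = 1
--         while run < len(rest) and rest[run] == rest[0]:
--             run += 1
--         parts.append(f"[{rest[0]}]{run}" if run > 1 else rest[0])
--         rest = rest[run:]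
--     return ' '.join(parts)
-- ===== Notes on version B (the rewrite author's own statement) =====
-- stated objective: idiomatic
-- what changed: A run-length-encodes on the fly with a current_str/count accumulator threaded through one index loop; B first builds the chunk list, then groups adjacent equal chunks (a scan per run) and formats each run, a build-then-group-then-format pipeline.
-- outside the precondition, e.g. on to_bracket_notation('ab', 0): A raises ValueError, B raises ValueError; on to_bracket_notation('ab', -1): A returns 'a', B returns ''
import Mathlib
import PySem

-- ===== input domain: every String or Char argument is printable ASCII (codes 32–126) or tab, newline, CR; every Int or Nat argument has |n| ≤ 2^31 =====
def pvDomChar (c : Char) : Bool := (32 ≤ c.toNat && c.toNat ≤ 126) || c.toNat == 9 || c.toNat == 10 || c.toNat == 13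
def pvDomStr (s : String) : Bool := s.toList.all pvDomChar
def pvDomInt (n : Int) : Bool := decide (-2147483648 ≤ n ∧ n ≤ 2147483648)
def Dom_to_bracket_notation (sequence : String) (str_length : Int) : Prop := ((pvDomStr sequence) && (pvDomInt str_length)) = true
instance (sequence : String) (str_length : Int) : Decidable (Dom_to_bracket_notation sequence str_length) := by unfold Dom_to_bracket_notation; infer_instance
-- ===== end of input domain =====

-- B groups the pre-built chunk list instead of threading A's current_str/count accumulator (idiomatic pipeline); equal return values proved on str_length ≥ 1.

-- ===== PORT A =====
def to_bracket_notation (sequence : String) (str_length : Int) : String :=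
  let st := (PySem.List.pyRange str_length (PySem.Str.len sequence) str_length).foldl
    (fun (st : List String × String × Int) i =>
      let next_str := PySem.Str.slice sequence (some i) (some (i + str_length))
      if next_str == st.2.1 then
        (st.1, st.2.1, st.2.2 + 1)
      else
        (st.1 ++ [if st.2.2 > 1 then "[" ++ st.2.1 ++ "]" ++ PySem.Int.toStr st.2.2 else st.2.1],
         next_str, 1))
    (([] : List String), PySem.Str.slice sequence none (some str_length), (1 : Int))
  PySem.Str.join " "
    (st.1 ++ [if st.2.2 > 1 then "[" ++ st.2.1 ++ "]" ++ PySem.Int.toStr st.2.2 else st.2.1])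

-- ===== PORT B =====
-- format one run: f"[{chunk}]{run}" if run > 1 else chunk
def bnFormat (chunk : String) (run : Int) : String :=
  if run > 1 then "[" ++ chunk ++ "]" ++ PySem.Int.toStr run else chunk

-- the outer while loop of B: peel one maximal run of equal adjacent chunks per step
def bnGroups : List String → List String
  | [] => []
  | h :: t =>
    let same := t.takeWhile (fun c => c == h)
    bnFormat h (1 + (same.length : Int)) :: bnGroups (t.drop same.length)
  termination_by l => l.length
  decreasing_by simp

def to_bracket_notation_alt (sequence : String) (str_length : Int) : String :=
  let chunks := (PySem.List.pyRange 0 (PySem.Str.len sequence) str_length).map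
    (fun i => PySem.Str.slice sequence (some i) (some (i + str_length)))
  PySem.Str.join " " (bnGroups chunks)

-- ===== PRECONDITION & SPEC =====
-- Pre_ excludes str_length = 0, where both programs raise ValueError (range step 0), and negative
-- str_length with |str_length| < len(sequence), where A's loop never runs and it returns the
-- accidental nonempty prefix sequence[:str_length] while B's chunk list is empty and it returns ''.
def Pre_to_bracket_notation (sequence : String) (str_length : Int) : Prop :=
  1 ≤ str_length ∨ (str_length < 0 ∧ (sequence.toList.length : Int) + str_length ≤ 0)
instance (sequence : String) (str_length : Int) : Decidable (Pre_to_bracket_notation sequence str_length) := by unfold Pre_to_bracket_notation; infer_instance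
def pvWitness_to_bracket_notation : String × Int := ("GACGACGACTT", 3)
def Spec_to_bracket_notation (sequence : String) (str_length : Int) (out : String) : Prop := out = to_bracket_notation_alt sequence str_length
instance (sequence : String) (str_length : Int) (out : String) : Decidable (Spec_to_bracket_notation sequence str_length out) := by unfold Spec_to_bracket_notation; infer_instance

-- ===== CLAIM (what is proved, stated in full; the proofs are below) =====
def Claim_equal_to_bracket_notation : Prop := ∀ (sequence : String) (str_length : Int), Dom_to_bracket_notation sequence str_length → Pre_to_bracket_notation sequence str_length → Spec_to_bracket_notation sequence str_length (to_bracket_notation sequence str_length)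

-- ===== LEMMAS AND PROOFS =====

-- A's loop body seen on the chunk it slices (definitionally A's lambda composed with the slicing)
def bnStepC (st : List String × String × Int) (c : String) : List String × String × Int :=
  if c == st.2.1 then (st.1, st.2.1, st.2.2 + 1)
  else (st.1 ++ [bnFormat st.2.1 st.2.2], c, 1)

lemma bnGroups_cons (h : String) (t : List String) :
    bnGroups (h :: t) =
      bnFormat h (1 + ((t.takeWhile (fun c => c == h)).length : Int)) ::
        bnGroups (t.drop (t.takeWhile (fun c => c == h)).length) := by
  simp only [bnGroups]

-- A's fold, rephrased as a fold of bnStepC over the mapped chunk list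
lemma bnA_eq (s : String) (L : Int) :
    to_bracket_notation s L =
      PySem.Str.join " "
        ((((PySem.List.pyRange L (PySem.Str.len s) L).map
              (fun i => PySem.Str.slice s (some i) (some (i + L)))).foldl bnStepC
            (([] : List String), PySem.Str.slice s none (some L), (1 : Int))).1 ++
          [bnFormat
            ((((PySem.List.pyRange L (PySem.Str.len s) L).map
                (fun i => PySem.Str.slice s (some i) (some (i + L)))).foldl bnStepC
              (([] : List String), PySem.Str.slice s none (some L), (1 : Int))).2.1)
            ((((PySem.List.pyRange L (PySem.Str.len s) L).map
                (fun i => PySem.Str.slice s (some i) (some (i + L)))).foldl bnStepC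
              (([] : List String), PySem.Str.slice s none (some L), (1 : Int))).2.2)]) := by
  rw [List.foldl_map]
  rfl

-- A's accumulator loop, run over any chunk list and then flushed, is B's grouping.
lemma bnKey : ∀ (cs res : List String) (cur : String) (cnt : Int),
    (cs.foldl bnStepC (res, cur, cnt)).1 ++
        [bnFormat (cs.foldl bnStepC (res, cur, cnt)).2.1 (cs.foldl bnStepC (res, cur, cnt)).2.2]
      = res ++ bnFormat cur (cnt + ((cs.takeWhile (fun c => c == cur)).length : Int)) ::
          bnGroups (cs.drop (cs.takeWhile (fun c => c == cur)).length) := by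
  intro cs
  induction cs with
  | nil =>
    intro res cur cnt
    simp [bnGroups]
  | cons c cs ih =>
    intro res cur cnt
    by_cases h : (c == cur) = true
    · have hs : bnStepC (res, cur, cnt) c = (res, cur, cnt + 1) := by
        simp [bnStepC, h]
      simp only [List.foldl_cons, hs]
      rw [ih]
      simp only [List.takeWhile_cons, h, if_true, List.length_cons, List.drop_succ_cons]
      first
      | rfl
      | (push_cast; ring_nf)
    · have hs : bnStepC (res, cur, cnt) c = (res ++ [bnFormat cur cnt], c, 1) := by
        simp [bnStepC, h]
      simp only [List.foldl_cons, hs]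
      rw [ih]
      simp only [List.takeWhile_cons, h, if_false, Bool.false_eq_true, List.length_nil,
        List.drop_zero]
      rw [bnGroups_cons]
      simp only [List.append_assoc, List.cons_append, List.nil_append,
        Nat.cast_zero, add_zero]

lemma bn_div_fact (L n : Int) (hL : 0 < L) (hn : 0 < n) :
    ((n + L - 1) / L).toNat = (if L < n then ((n - L + L - 1) / L).toNat else 0) + 1 := by
  have h1 : (n + L - 1) / L = (n - 1) / L + 1 := by
    rw [show n + L - 1 = (n - 1) + 1 * L by ring, Int.add_mul_ediv_right _ _ (by omega : L ≠ 0)]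
  have h2 : 0 ≤ (n - 1) / L := Int.ediv_nonneg (by omega) (by omega)
  split_ifs with h
  · rw [show n - L + L - 1 = n - 1 by ring]
    omega
  · have h3 : (n - 1) / L = 0 := Int.ediv_eq_zero_of_lt (by omega) (by omega)
    omega

lemma bn_pyRange_cons (L n : Int) (hL : 0 < L) (hn : 0 < n) :
    PySem.List.pyRange 0 n L = 0 :: PySem.List.pyRange L n L := by
  rw [PySem.List.pyRange_of_pos 0 n hL, PySem.List.pyRange_of_pos L n hL]
  rw [if_pos hn]
  rw [show n - 0 + L - 1 = n + L - 1 by ring]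
  rw [bn_div_fact L n hL hn]
  rw [List.range_succ_eq_map, List.map_cons, List.map_map]
  congr 1
  · simp
  · apply List.map_congr_left
    intro k _
    simp only [Function.comp_apply]
    push_cast
    ring

lemma bn_pyRange_neg_nil (a b s : Int) (hs : s < 0) (hab : a ≤ b) :
    PySem.List.pyRange a b s = [] := by
  simp only [PySem.List.pyRange]
  rw [if_neg (by omega : ¬ s = 0)]
  rw [if_neg (by omega : ¬ 0 < s), if_neg (by omega : ¬ b < a)]
  simp

lemma bn_head_chunk (s : String) (L : Int) :
    PySem.Str.slice s (some 0) (some (0 + L)) = PySem.Str.slice s none (some L) := by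
  apply String.toList_inj.mp
  simp [PySem.Str.toList_slice, zero_add]

-- ===== VERDICT (by name: the statement is the Claim_ definition above) =====
theorem to_bracket_notation_spec : Claim_equal_to_bracket_notation := by
  intro s L _hD hP
  unfold Pre_to_bracket_notation at hP
  unfold Spec_to_bracket_notation
  rcases hP with hP | ⟨hneg, hlen⟩
  swap
  · -- negative str_length whose slice artefact is empty: both programs return ""
    have hn0 : (0 : Int) ≤ PySem.Str.len s := by
      simp [PySem.Str.len_eq]
    obtain ⟨k, hk, rfl⟩ : ∃ k : Nat, 0 < k ∧ L = -(k : Int) := ⟨(-L).toNat, by omega, by omega⟩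
    have hlen' : s.toList.length ≤ k := by omega
    unfold to_bracket_notation to_bracket_notation_alt
    rw [bn_pyRange_neg_nil 0 _ _ hneg hn0, bn_pyRange_neg_nil _ _ _ hneg (by omega)]
    simp only [List.map_nil, List.foldl_nil]
    apply String.toList_inj.mp
    simp [bnGroups, PySem.Str.toList_join, PySem.Chars.join_singleton, PySem.Chars.join_nil,
      PySem.Str.toList_slice]
    rw [PySem.List.slice_to_neg_natCast _ _ hk]
    rw [Nat.sub_eq_zero_of_le hlen']
    simp
  have hL : (0 : Int) < L := by omega
  by_cases hn : 0 < PySem.Str.len s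
  · rw [bnA_eq, bnKey]
    unfold to_bracket_notation_alt
    rw [bn_pyRange_cons L (PySem.Str.len s) hL hn]
    simp only [List.map_cons]
    rw [bn_head_chunk, bnGroups_cons]
    simp only [List.nil_append]
  · have h0 : s.toList = [] := by
      simp only [PySem.Str.len_eq] at hn
      have : s.toList.length = 0 := by omega
      exact List.length_eq_zero_iff.mp this
    have hr0 : PySem.List.pyRange 0 (PySem.Str.len s) L = [] := by
      rw [PySem.List.pyRange_of_pos 0 _ hL, if_neg hn]
      simp
    have hrL : PySem.List.pyRange L (PySem.Str.len s) L = [] := by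
      rw [PySem.List.pyRange_of_pos L _ hL, if_neg (by omega)]
      simp
    unfold to_bracket_notation to_bracket_notation_alt
    rw [hr0, hrL]
    simp only [List.map_nil, List.foldl_nil]
    apply String.toList_inj.mp
    simp [bnGroups, PySem.Str.toList_join, PySem.Chars.join_singleton, PySem.Chars.join_nil,
      PySem.Str.toList_slice, h0, PySem.List.slice]
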